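-- pv_equiv track=rewrite | github.com/mitthusbrinner/three-species-predator-prey | boff.py | brute_force
-- ===== SOURCE A (Python) =====
-- def brute_force(n, a, b):
--     d = len(str(n))
--     total = 0
--     mult = 0
--     ending = 0
--     double_counted = 0
--     for i in range(a, b + 1):
--         if i % 10 ** d == n or i % n == 0:
--             total += 1
--         if i % 10 ** d == n and i % n == 0:
--             double_counted += 1
--         if i % 10 ** d == n:
--             ending += 1
--         if i % n == 0:
--             mult += 1
--     return total, mult, ending, double_counted
-- ===== SOURCE B (Python) =====
-- def brute_force(n, a, b):
--     # Closed-form arithmetic-progression counting instead of scanning the range.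
--     if a > b:
--         return 0, 0, 0, 0
--
--     def cnt(r, m):
--         # number of i in [a, b] with i % m == r
--         return (b - r) // m - (a - 1 - r) // m
--
--     M = 10 ** len(str(n))
--     x, y = n, M
--     while y:
--         x, y = y, x % y
--     L = n * M // x  # lcm(n, M)
--     mult = cnt(0, n)
--     ending = cnt(n, M)
--     double = cnt(n, L)
--     return mult + ending - double, mult, ending, double
-- ===== Notes on version B (the rewrite author's own statement) =====
-- stated objective: faster
-- what changed: Replaced the element-by-element scan of range(a, b+1) by closed-form floor-division counts of the three arithmetic progressions (multiples of n, numbers congruent to n mod 10^d, their intersection via lcm computed with the Euclidean algorithm); Pre_ restricts to positive n, the function's natural domain: n = 0 makes A raise ZeroDivisionError and for negative n the 'ends with the digits of n' test is meaningless, so A's value there is an artefact of its scan.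
-- outside the precondition, e.g. on brute_force(-7, 0, 30): A returns (5, 5, 0, 0), B returns (-5, -5, 0, 0)
import Mathlib
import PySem

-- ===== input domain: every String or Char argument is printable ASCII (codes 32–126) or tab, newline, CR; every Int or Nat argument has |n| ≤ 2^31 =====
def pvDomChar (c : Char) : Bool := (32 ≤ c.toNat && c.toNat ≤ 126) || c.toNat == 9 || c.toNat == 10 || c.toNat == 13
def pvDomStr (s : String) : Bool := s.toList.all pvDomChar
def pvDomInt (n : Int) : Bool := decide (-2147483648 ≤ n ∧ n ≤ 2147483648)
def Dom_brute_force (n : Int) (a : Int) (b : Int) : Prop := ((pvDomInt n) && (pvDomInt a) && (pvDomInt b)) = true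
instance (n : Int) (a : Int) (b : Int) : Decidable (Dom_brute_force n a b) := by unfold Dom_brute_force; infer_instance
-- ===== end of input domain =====

-- B computes the four counts in closed form (floor-division counts of the three
-- arithmetic progressions, intersection via lcm) instead of scanning the range.

-- ===== PORT A =====
-- Python returns the tuple (total, mult, ending, double_counted); rendered as List Int.
def brute_force (n : Int) (a : Int) (b : Int) : List Int :=
  let d := (PySem.Int.toChars n).length        -- d = len(str(n))
  let s := (PySem.List.pyRange a (b + 1) 1).foldl
    (fun (st : Int × Int × Int × Int) i =>
      ( if PySem.Int.mod i ((10 : Int) ^ d) == n || PySem.Int.mod i n == 0 then st.1 + 1 else st.1,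
        if PySem.Int.mod i n == 0 then st.2.1 + 1 else st.2.1,
        if PySem.Int.mod i ((10 : Int) ^ d) == n then st.2.2.1 + 1 else st.2.2.1,
        if PySem.Int.mod i ((10 : Int) ^ d) == n && PySem.Int.mod i n == 0 then st.2.2.2 + 1 else st.2.2.2 ))
    (0, 0, 0, 0)
  [s.1, s.2.1, s.2.2.1, s.2.2.2]

-- ===== PORT B =====
-- the `while y: x, y = y, x % y` loop of Source B
def pvEuclid (x : Int) (y : Int) : Int :=
  if h : y = 0 then x else pvEuclid y (PySem.Int.mod x y)
termination_by y.natAbs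
decreasing_by
  rcases lt_or_gt_of_ne h with hy | hy
  · have h1 := PySem.Int.mod_neg_bounds x hy
    omega
  · have h1 := PySem.Int.mod_nonneg x hy
    have h2 := PySem.Int.mod_lt x hy
    omega

-- the local closure `cnt(r, m)` of Source B
def pvCnt (a : Int) (b : Int) (r : Int) (m : Int) : Int :=
  PySem.Int.floordiv (b - r) m - PySem.Int.floordiv (a - 1 - r) m

def brute_force_alt (n : Int) (a : Int) (b : Int) : List Int :=
  if a > b then [0, 0, 0, 0]
  else
    let M := (10 : Int) ^ (PySem.Int.toChars n).length
    let g := pvEuclid n M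
    let L := PySem.Int.floordiv (n * M) g
    let mult := pvCnt a b 0 n
    let ending := pvCnt a b n M
    let double := pvCnt a b n L
    [mult + ending - double, mult, ending, double]

-- ===== PRECONDITION & SPEC =====
-- Pre_ restricts to positive n, the function's natural domain (n stands for a digit
-- suffix): A raises ZeroDivisionError at n = 0, and for negative n the 'ends with the
-- digits of n' test is vacuous, so A's value there is an artefact of its scan.
def Pre_brute_force (n : Int) (a : Int) (b : Int) : Prop := 0 < n
instance (n : Int) (a : Int) (b : Int) : Decidable (Pre_brute_force n a b) := by unfold Pre_brute_force; infer_instance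
def pvWitness_brute_force : Int × Int × Int := (7, 0, 30)

def Spec_brute_force (n : Int) (a : Int) (b : Int) (out : List Int) : Prop := out = brute_force_alt n a b
instance (n : Int) (a : Int) (b : Int) (out : List Int) : Decidable (Spec_brute_force n a b out) := by unfold Spec_brute_force; infer_instance

-- ===== CLAIM (what is proved, stated in full; the proofs are below) =====
def Claim_equal_brute_force : Prop := ∀ (n : Int) (a : Int) (b : Int), Dom_brute_force n a b → Pre_brute_force n a b → Spec_brute_force n a b (brute_force n a b)

-- ===== LEMMAS AND PROOFS =====

-- A's loop accumulates the four counts of the traversed list.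
theorem pv_foldA (p q : Int → Bool) (l : List Int) (t m e dc : Int) :
    l.foldl
      (fun (st : Int × Int × Int × Int) i =>
        ( if p i || q i then st.1 + 1 else st.1,
          if q i then st.2.1 + 1 else st.2.1,
          if p i then st.2.2.1 + 1 else st.2.2.1,
          if p i && q i then st.2.2.2 + 1 else st.2.2.2 ))
      (t, m, e, dc)
    = (t + (l.countP (fun i => p i || q i) : Int),
       m + (l.countP q : Int),
       e + (l.countP p : Int),
       dc + (l.countP (fun i => p i && q i) : Int)) := by
  induction l generalizing t m e dc with
  | nil => simp
  | cons x xs ih =>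
    simp only [List.foldl_cons, ih, List.countP_cons]
    by_cases hp : p x <;> by_cases hq : q x <;>
      simp [hp, hq, Prod.ext_iff] <;> push_cast <;> omega

-- inclusion–exclusion for boolean counts
theorem pv_countP_or_and (p q : Int → Bool) (l : List Int) :
    l.countP (fun i => p i || q i) + l.countP (fun i => p i && q i)
      = l.countP p + l.countP q := by
  induction l with
  | nil => simp
  | cons x xs ih =>
    simp only [List.countP_cons]
    by_cases hp : p x <;> by_cases hq : q x <;> simp [hp, hq] <;> omega

theorem pv_ediv_sub_one (m x : Int) (hm : 0 < m) :
    x / m - (x - 1) / m = if x % m = 0 then 1 else 0 := by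
  have h0 : 0 ≤ x % m := Int.emod_nonneg x (by omega)
  have h1 : x % m < m := Int.emod_lt_of_pos x hm
  have hx := Int.mul_ediv_add_emod x m
  by_cases hs : x % m = 0
  · rw [if_pos hs]
    rw [show x - 1 = (m - 1) + (x / m - 1) * m by linear_combination -hx + hs]
    rw [Int.add_mul_ediv_right _ _ (by omega : m ≠ 0)]
    rw [Int.ediv_eq_zero_of_lt (a := m - 1) (by omega) (by omega)]
    ring
  · rw [if_neg hs]
    rw [show x - 1 = (x % m - 1) + (x / m) * m by linear_combination -hx]
    rw [Int.add_mul_ediv_right _ _ (by omega : m ≠ 0)]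
    rw [Int.ediv_eq_zero_of_lt (a := x % m - 1) (by omega) (by omega)]
    ring

-- one step of the closed-form count
theorem pv_cnt_step (r m a b : Int) (hm : 0 < m) (hr0 : 0 ≤ r) (hr : r < m) :
    pvCnt a b r m = pvCnt a (b - 1) r m + (if PySem.Int.mod b m == r then 1 else 0) := by
  simp only [pvCnt, PySem.Int.floordiv_eq_ediv_of_pos hm, PySem.Int.mod_eq_emod_of_pos hm,
    beq_iff_eq]
  have h1 := pv_ediv_sub_one m (b - r) hm
  have hrr : r % m = r := Int.emod_eq_of_lt hr0 hr
  have h2 : b % m = r ↔ (b - r) % m = 0 := by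
    conv_lhs => rw [← hrr]
    exact Int.emod_eq_emod_iff_emod_sub_eq_zero
  have h3 : b - 1 - r = b - r - 1 := by ring
  rw [h3]
  by_cases hc : b % m = r
  · rw [if_pos hc, if_pos (h2.mp hc)] at *
    linarith [h1]
  · rw [if_neg hc, if_neg (fun h => hc (h2.mpr h))] at *
    linarith [h1]

-- the closed form counts residues in [a, b]
theorem pv_countCong (m r : Int) (hm : 0 < m) (hr0 : 0 ≤ r) (hr : r < m) :
    ∀ (a b : Int), a ≤ b + 1 →
      ((PySem.List.pyRange a (b + 1) 1).countP (fun i => PySem.Int.mod i m == r) : Int)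
        = pvCnt a b r m := by
  intro a
  have H : ∀ (k : Nat) (b : Int), (b + 1 - a).toNat = k → a ≤ b + 1 →
      ((PySem.List.pyRange a (b + 1) 1).countP (fun i => PySem.Int.mod i m == r) : Int)
        = pvCnt a b r m := by
    intro k
    induction k with
    | zero =>
      intro b hk hab
      have hba : b + 1 = a := by omega
      rw [hba, PySem.List.pyRange_one_eq_nil (le_refl a)]
      simp only [List.countP_nil, Nat.cast_zero, pvCnt]
      have : b - r = a - 1 - r := by omega
      rw [this]
      omega
    | succ k ih =>
      intro b hk hab
      have hab' : a ≤ b := by omega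
      rw [PySem.List.pyRange_one_succ_right hab', List.countP_append,
        pv_cnt_step r m a b hm hr0 hr]
      have hb1 : b - 1 + 1 = b := by ring
      have ihb := ih (b - 1) (by omega) (by omega)
      rw [hb1] at ihb
      simp only [List.countP_cons, List.countP_nil]
      push_cast
      rw [ihb]
      split <;> simp

  intro b hab
  exact H (b + 1 - a).toNat b rfl hab

-- str(n) has enough digits: n < 10 ^ len(str(n)) for n ≥ 0
theorem pv_toChars_bound (n : Int) (h : 0 ≤ n) :
    n < (10 : Int) ^ (PySem.Int.toChars n).length := by
  have hneg : ¬ n < 0 := by omega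
  simp only [PySem.Int.toChars, if_neg hneg]
  have hb : (1 : Nat) < 10 := by norm_num
  have hpos : 0 < (Nat.toDigits 10 n.toNat).length := Nat.length_toDigits_pos
  have hlt := (Nat.length_toDigits_le_iff hb hpos).mp (le_refl _)
  have h2 : (n.toNat : Int) < ((10 : Nat) ^ (Nat.toDigits 10 n.toNat).length : Nat) := by
    exact_mod_cast hlt
  rw [Int.toNat_of_nonneg h] at h2
  calc n < ((10 : Nat) ^ (Nat.toDigits 10 n.toNat).length : Nat) := h2
    _ = (10 : Int) ^ (Nat.toDigits 10 n.toNat).length := by push_cast; ring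

-- the Euclid loop computes gcd (on the nonnegative inputs it is used with)
theorem pv_euclid_eq_gcd (x y : Int) (hx : 0 ≤ x) (hy : 0 ≤ y) :
    pvEuclid x y = (Int.gcd x y : Int) := by
  by_cases h : y = 0
  · subst h
    rw [pvEuclid]
    simp [Int.gcd, Int.natAbs_of_nonneg hx]
  · have hypos : 0 < y := lt_of_le_of_ne hy (Ne.symm h)
    have hmn := PySem.Int.mod_nonneg x hypos
    rw [pvEuclid, dif_neg h]
    rw [pv_euclid_eq_gcd y (PySem.Int.mod x y) hy hmn]
    congr 1
    rw [PySem.Int.mod_eq_emod_of_pos hypos]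
    obtain ⟨p, rfl⟩ := Int.eq_ofNat_of_zero_le hx
    obtain ⟨q, rfl⟩ := Int.eq_ofNat_of_zero_le hy
    rw [← Int.natCast_emod, Int.gcd_natCast_natCast, Int.gcd_natCast_natCast,
      Nat.gcd_comm q (p % q), ← Nat.gcd_rec, Nat.gcd_comm]
termination_by y.natAbs
decreasing_by
  have h1 := PySem.Int.mod_nonneg x (by omega : (0:Int) < y)
  have h2 := PySem.Int.mod_lt x (by omega : (0:Int) < y)
  omega

-- ===== VERDICT (by name: the statement is the Claim_ definition above) =====
theorem brute_force_spec : Claim_equal_brute_force := by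
  intro n a b _ hpre
  have hpos : 0 < n := hpre
  show brute_force n a b = brute_force_alt n a b
  have hn : n ≠ 0 := by omega
  by_cases hab : a > b
  · simp [brute_force, brute_force_alt, PySem.List.pyRange_one_eq_nil (by omega : b + 1 ≤ a), hab]
  · push_neg at hab
    simp only [brute_force, brute_force_alt, if_neg (not_lt.mpr hab)]
    rw [pv_foldA (fun i => PySem.Int.mod i ((10:Int) ^ (PySem.Int.toChars n).length) == n)
        (fun i => PySem.Int.mod i n == 0)]
    set M := (10:Int) ^ (PySem.Int.toChars n).length with hM
    simp only [zero_add]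
    have hM0 : (0:Int) < M := pow_pos (by norm_num) _
    have h0n : (0:Int) ≤ n := hpos.le
    have hnM : n < M := pv_toChars_bound n h0n
    have hgcd : pvEuclid n M = (Int.gcd n M : Int) := pv_euclid_eq_gcd n M h0n hM0.le
    have hgpos : (0:Int) < (Int.gcd n M : Int) := by
      exact_mod_cast Int.gcd_pos_iff.mpr (Or.inl hn)
    have hmul : n * M = (Int.gcd n M : Int) * (Int.lcm n M : Int) := by
      have h := Int.gcd_mul_lcm n M
      have h2 : ((Int.gcd n M * Int.lcm n M : Nat) : Int) = ((n.natAbs * M.natAbs : Nat) : Int) := by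
        exact_mod_cast congrArg (fun k : Nat => (k : Int)) h
      push_cast at h2
      rw [abs_of_nonneg h0n, abs_of_nonneg hM0.le] at h2
      linarith [h2]
    have hL : PySem.Int.floordiv (n * M) (pvEuclid n M) = (Int.lcm n M : Int) := by
      rw [hgcd, PySem.Int.floordiv_eq_ediv_of_pos hgpos, hmul,
        Int.mul_ediv_cancel_left _ (ne_of_gt hgpos)]
    set L : Int := (Int.lcm n M : Int) with hLdef
    have hLpos : (0:Int) < L := by nlinarith [hmul, mul_pos hpos hM0]
    have hML : M ≤ L := by
      have hdvd : M ∣ L := by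
        rw [hLdef, Int.coe_lcm]
        exact dvd_lcm_right n M
      exact Int.le_of_dvd hLpos hdvd
    have hnL : n < L := lt_of_lt_of_le hnM hML
    have hcrt : ∀ i ∈ PySem.List.pyRange a (b+1) 1,
        ((PySem.Int.mod i M == n && PySem.Int.mod i n == 0) = true ↔ (PySem.Int.mod i L == n) = true) := by
      intro i _
      have e1 : PySem.Int.mod i M = n ↔ M ∣ (i - n) := by
        rw [PySem.Int.mod_eq_emod_of_pos hM0,
          show (i % M = n) ↔ (i % M = n % M) by rw [Int.emod_eq_of_lt h0n hnM],
          Int.emod_eq_emod_iff_emod_sub_eq_zero]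
        exact ⟨Int.dvd_of_emod_eq_zero, Int.emod_eq_zero_of_dvd⟩
      have e2 : PySem.Int.mod i n = 0 ↔ n ∣ (i - n) := by
        rw [PySem.Int.mod_eq_zero_iff_dvd]
        constructor
        · intro h
          exact dvd_sub h (dvd_refl n)
        · intro h
          have h' := dvd_add h (dvd_refl n)
          simpa using h'
      have e3 : PySem.Int.mod i L = n ↔ L ∣ (i - n) := by
        rw [PySem.Int.mod_eq_emod_of_pos hLpos,
          show (i % L = n) ↔ (i % L = n % L) by rw [Int.emod_eq_of_lt h0n hnL],
          Int.emod_eq_emod_iff_emod_sub_eq_zero]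
        exact ⟨Int.dvd_of_emod_eq_zero, Int.emod_eq_zero_of_dvd⟩
      have e4 : M ∣ (i - n) ∧ n ∣ (i - n) ↔ L ∣ (i - n) := by
        rw [hLdef, Int.coe_lcm]
        constructor
        · intro h
          exact lcm_dvd_iff.mpr ⟨h.2, h.1⟩
        · intro h
          have h' := lcm_dvd_iff.mp h
          exact ⟨h'.2, h'.1⟩
      simp only [Bool.and_eq_true, beq_iff_eq]
      rw [e1, e2, e3]
      exact e4
    have hca := List.countP_congr hcrt
    have ie := pv_countP_or_and (fun i => PySem.Int.mod i M == n)
      (fun i => PySem.Int.mod i n == 0) (PySem.List.pyRange a (b+1) 1)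
    have c_end := pv_countCong M n hM0 h0n hnM a b (by omega)
    have c_mult := pv_countCong n 0 hpos le_rfl hpos a b (by omega)
    have c_dbl := pv_countCong L n hLpos h0n hnL a b (by omega)
    have htot : (List.countP (fun i => PySem.Int.mod i M == n || PySem.Int.mod i n == 0)
        (PySem.List.pyRange a (b+1) 1) : Int)
        = pvCnt a b 0 n + pvCnt a b n M - pvCnt a b n L := by
      rw [← c_dbl, ← c_mult, ← c_end, ← hca]
      omega
    rw [hL, htot, hca, c_dbl, c_mult, c_end]
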